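-- pv_equiv track=rewrite | github.com/hw1004/1day1commit | algorithms/Programmers/코테 연습/binarysearch/징검다리/sol1.py | solution
-- ===== SOURCE A (Python) =====
-- def solution(distance, rocks, n):
--     rocks.sort(reverse=False)
--     min_distance = []
--     for i in range(len(rocks)-1):
--         for j in range(i+1, len(rocks)):
--             removed_list = [rock for rock in rocks]
--             removed_list.remove(removed_list[j])
--             removed_list.remove(removed_list[i])
--
--             distance_2 = []
--             removed_list.append(distance)
--
--             for k in range(len(removed_list)):
--                 if k == 0:
--                     distance_2.append(removed_list[k])
--                 else:
--                     distance_2.append(removed_list[k] - removed_list[k-1])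
--             min_distance.append(min(distance_2))
--
--     return max(min_distance)
-- ===== SOURCE B (Python) =====
-- def solution(distance, rocks, n):
--     # Build the gap array once; for each pair of removed rocks, merge the
--     # affected gaps by slicing instead of rebuilding and re-diffing the rock list.
--     rocks.sort()
--     g = []
--     prev = 0
--     for r in rocks:
--         g.append(r - prev)
--         prev = r
--     g.append(distance - prev)
--     m = len(rocks)
--     best = None
--     for i in range(m - 1):
--         for j in range(i + 1, m):
--             h = g[:j] + [g[j] + g[j + 1]] + g[j + 2:]
--             h = h[:i] + [h[i] + h[i + 1]] + h[i + 2:]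
--             cand = min(h)
--             if best is None or cand > best:
--                 best = cand
--     return best
-- ===== Notes on version B (the rewrite author's own statement) =====
-- stated objective: alternative
-- what changed: B computes the sorted gap array once and, for each removed pair of rocks, derives the candidate gap list by merging the two affected gaps with slices and keeps a running max, instead of rebuilding the rock list, removing two rocks by value and re-diffing all points for every pair as A does.
import Mathlib
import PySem

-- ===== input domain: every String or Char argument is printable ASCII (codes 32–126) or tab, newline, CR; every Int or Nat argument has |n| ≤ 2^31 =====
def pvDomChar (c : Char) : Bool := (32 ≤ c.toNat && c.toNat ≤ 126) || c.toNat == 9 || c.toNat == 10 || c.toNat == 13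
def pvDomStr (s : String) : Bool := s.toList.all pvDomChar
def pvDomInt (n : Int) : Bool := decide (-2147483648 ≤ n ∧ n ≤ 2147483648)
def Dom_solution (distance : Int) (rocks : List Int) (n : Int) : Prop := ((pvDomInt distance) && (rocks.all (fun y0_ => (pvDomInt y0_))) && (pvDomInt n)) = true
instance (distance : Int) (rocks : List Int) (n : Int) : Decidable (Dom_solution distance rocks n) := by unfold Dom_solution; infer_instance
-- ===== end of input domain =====

-- B builds the sorted gap array once and, per removed pair, merges the affected
-- gaps by slicing, instead of rebuilding the rock list and re-diffing it (A).
-- Both A and B sort `rocks` in place in Python; the equivalence is about the return value.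

-- ===== PORT A =====
-- indices taken from range() are always in range, and remove() always finds its
-- argument (it was just read from the list), so the .getD defaults are unreachable;
-- min() is taken of a nonempty list whenever the loops run at all.
def solution (distance : Int) (rocks : List Int) (n : Int) : Int :=
  let s := PySem.List.sorted rocks (fun x => x) false
  let min_distance := (PySem.List.pyRange 0 ((s.length : Int) - 1) 1).foldl (fun md i =>
    (PySem.List.pyRange (i + 1) (s.length : Int) 1).foldl (fun md j =>
      let removed_list := s.map (fun rock => rock)
      let removed_list := (PySem.List.remove? removed_list (PySem.List.pyGetD removed_list j 0)).getD removed_list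
      let removed_list := (PySem.List.remove? removed_list (PySem.List.pyGetD removed_list i 0)).getD removed_list
      let removed_list := removed_list ++ [distance]
      let distance_2 := (PySem.List.pyRange 0 (removed_list.length : Int) 1).foldl (fun d2 k =>
        if k == 0 then d2 ++ [PySem.List.pyGetD removed_list k 0]
        else d2 ++ [PySem.List.pyGetD removed_list k 0 - PySem.List.pyGetD removed_list (k - 1) 0]) []
      md ++ [(PySem.List.min? distance_2 (fun x => x)).getD 0]) md) []
  (PySem.List.max? min_distance (fun x => x)).getD 0

-- ===== PORT B =====
def solution_alt (distance : Int) (rocks : List Int) (n : Int) : Int :=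
  let s := PySem.List.sorted rocks (fun x => x) false
  let gp := s.foldl (fun (gp : List Int × Int) r => (gp.1 ++ [r - gp.2], r)) (([] : List Int), 0)
  let g := gp.1 ++ [distance - gp.2]
  let m : Int := (s.length : Int)
  let best := (PySem.List.pyRange 0 (m - 1) 1).foldl (fun best i =>
    (PySem.List.pyRange (i + 1) m 1).foldl (fun (best : Option Int) j =>
      let h := PySem.List.slice g none (some j) ++ [PySem.List.pyGetD g j 0 + PySem.List.pyGetD g (j + 1) 0] ++ PySem.List.slice g (some (j + 2)) none
      let h := PySem.List.slice h none (some i) ++ [PySem.List.pyGetD h i 0 + PySem.List.pyGetD h (i + 1) 0] ++ PySem.List.slice h (some (i + 2)) none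
      let cand := (PySem.List.min? h (fun x => x)).getD 0
      match best with
      | none => some cand
      | some b => if b < cand then some cand else some b) best) none
  match best with
  | none => 0
  | some b => b

-- ===== PRECONDITION & SPEC =====
-- Pre_ excludes lists with fewer than two rocks, on which Python A raises
-- ValueError (max() of an empty sequence).
def Pre_solution (distance : Int) (rocks : List Int) (n : Int) : Prop := 2 ≤ rocks.length
instance (distance : Int) (rocks : List Int) (n : Int) : Decidable (Pre_solution distance rocks n) := by unfold Pre_solution; infer_instance
def pvWitness_solution : Int × List Int × Int := (10, ([2, 5], 2))

def Spec_solution (distance : Int) (rocks : List Int) (n : Int) (out : Int) : Prop := out = solution_alt distance rocks n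
instance (distance : Int) (rocks : List Int) (n : Int) (out : Int) : Decidable (Spec_solution distance rocks n out) := by unfold Spec_solution; infer_instance

-- ===== CLAIM (what is proved, stated in full; the proofs are below) =====
def Claim_equal_solution : Prop := ∀ (distance : Int) (rocks : List Int) (n : Int), Dom_solution distance rocks n → Pre_solution distance rocks n → Spec_solution distance rocks n (solution distance rocks n)

-- ===== LEMMAS AND PROOFS =====

-- gaps of a list of points relative to a previous point p
def diffs (p : Int) : List Int → List Int
  | [] => []
  | x :: xs => (x - p) :: diffs x xs

-- merge the gaps at positions k and k+1 (what removing point k does to the gap list)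
def mergeAt (k : Nat) (l : List Int) : List Int :=
  l.take k ++ [l.getD k 0 + l.getD (k + 1) 0] ++ l.drop (k + 2)

theorem diffs_length (p : Int) (l : List Int) : (diffs p l).length = l.length := by
  induction l generalizing p with
  | nil => rfl
  | cons x xs ih => simp [diffs, ih]

theorem diffs_getD (l : List Int) (p : Int) (t : Nat) (h : t < l.length) :
    (diffs p l).getD t 0 = l.getD t 0 - (if t = 0 then p else l.getD (t - 1) 0) := by
  induction l generalizing p t with
  | nil => simp at h
  | cons x xs ih =>
    cases t with
    | zero => simp [diffs]
    | succ t =>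
      simp only [diffs, List.getD_cons_succ]
      rw [ih x t (by simpa using h)]
      cases t with
      | zero => simp
      | succ t => simp

theorem diffs_append_singleton (s : List Int) (p d : Int) :
    diffs p (s ++ [d]) = diffs p s ++ [d - s.getLastD p] := by
  induction s generalizing p with
  | nil => simp [diffs]
  | cons x xs ih =>
    rw [List.getLastD_cons, List.cons_append]
    simp only [diffs, ih x, List.cons_append]

theorem mergeAt_cons (k : Nat) (a : Int) (l : List Int) :
    mergeAt (k + 1) (a :: l) = a :: mergeAt k l := by
  simp [mergeAt]

theorem diffs_eraseIdx (xs : List Int) (k : Nat) (p d : Int) (h : k < xs.length) :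
    diffs p (xs.eraseIdx k ++ [d]) = mergeAt k (diffs p (xs ++ [d])) := by
  induction xs generalizing p k with
  | nil => simp at h
  | cons x t ih =>
    cases k with
    | zero =>
      cases t with
      | nil => simp [diffs, mergeAt]
      | cons y t' => simp [diffs, mergeAt]
    | succ k =>
      have hk : k < t.length := by simpa using h
      simp only [List.eraseIdx_cons_succ, List.cons_append, diffs, mergeAt_cons]
      rw [ih k x hk]

theorem cons_eraseIdx_of_sorted (t : List Int) (k : Nat) (hs : t.Pairwise (· ≤ ·))
    (h : k < t.length) (hle : t.getD k 0 ≤ t.getD 0 0) :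
    t.getD k 0 :: t.eraseIdx k = t := by
  induction t generalizing k with
  | nil => simp at h
  | cons y t' ih =>
    rcases List.pairwise_cons.mp hs with ⟨hy, ht'⟩
    cases k with
    | zero => simp
    | succ k =>
      have hk : k < t'.length := by simpa using h
      have hmem : t'.getD k 0 ∈ t' := by rw [List.getD_eq_getElem _ _ hk]; exact List.getElem_mem hk
      have h1 : y ≤ t'.getD k 0 := hy _ hmem
      have h2 : t'.getD k 0 ≤ y := by simpa using hle
      have heq : t'.getD k 0 = y := le_antisymm h2 h1
      have h0 : t'.getD 0 0 ∈ t' := by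
        have hk0 : 0 < t'.length := by omega
        rw [List.getD_eq_getElem _ _ hk0]; exact List.getElem_mem hk0
      have hih : t'.getD k 0 :: t'.eraseIdx k = t' := ih k ht' hk (by rw [heq]; exact hy _ h0)
      rw [heq] at hih
      simp only [List.getD_cons_succ, List.eraseIdx_cons_succ, heq, hih]

theorem remove_getD_sorted (s : List Int) (k : Nat) (hs : s.Pairwise (· ≤ ·))
    (h : k < s.length) : PySem.List.remove? s (s.getD k 0) = some (s.eraseIdx k) := by
  induction s generalizing k with
  | nil => simp at h
  | cons x t ih =>
    rcases List.pairwise_cons.mp hs with ⟨hx, ht⟩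
    cases k with
    | zero => simp
    | succ k =>
      have hk : k < t.length := by simpa using h
      simp only [List.getD_cons_succ]
      by_cases hxv : x = t.getD k 0
      · rw [← hxv, PySem.List.remove?_cons_self]
        have := cons_eraseIdx_of_sorted (x :: t) (k + 1) hs h (by simpa using le_of_eq hxv.symm)
        simp only [List.getD_cons_succ] at this
        have htail : (x :: t).eraseIdx (k + 1) = t := by
          have := congrArg List.tail this
          simpa using this
        rw [htail]
      · rw [PySem.List.remove?_cons_of_ne t hxv, ih k ht hk]
        simp

-- the per-pair value both programs compute, and the list of them over all pairs
def pairVal (d : Int) (s : List Int) (i j : Int) : Int :=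
  (PySem.List.min? (mergeAt i.toNat (mergeAt j.toNat (diffs 0 (s ++ [d])))) (fun x => x)).getD 0

def allPairs (d : Int) (s : List Int) : List Int :=
  (PySem.List.pyRange 0 ((s.length : Int) - 1) 1).flatMap (fun i =>
    (PySem.List.pyRange (i + 1) (s.length : Int) 1).map (fun j => pairVal d s i j))

theorem d2_map_eq_diffs (rl : List Int) :
    (PySem.List.pyRange 0 (rl.length : Int) 1).map
      (fun k => if k == 0 then PySem.List.pyGetD rl k 0
        else PySem.List.pyGetD rl k 0 - PySem.List.pyGetD rl (k - 1) 0) = diffs 0 rl := by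
  apply List.ext_getElem
  · simp [PySem.List.length_pyRange_one, diffs_length]
  · intro t h1 h2
    have hlt : t < rl.length := by
      simpa [PySem.List.length_pyRange_one] using h1
    rw [List.getElem_map, PySem.List.getElem_pyRange_one _ _ _ (by simpa using h1)]
    rw [← List.getD_eq_getElem _ 0 h2, diffs_getD rl 0 t hlt]
    by_cases ht0 : t = 0
    · subst ht0; simp [PySem.List.pyGetD_zero, List.getD]
    · have hne : ((0 : Int) + (t : Int) == 0) = false := by
        simp only [beq_eq_false_iff_ne, ne_eq, zero_add, Int.natCast_eq_zero]; omega
      have hcast : (0 : Int) + (t : Int) - 1 = ((t - 1 : Nat) : Int) := by omega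
      rw [if_neg (by simp [hne]; omega), if_neg ht0, hcast]
      simp [PySem.List.pyGetD_natCast]

theorem d2_foldl_eq_diffs (rl : List Int) :
    (PySem.List.pyRange 0 (rl.length : Int) 1).foldl (fun d2 k =>
        if k == 0 then d2 ++ [PySem.List.pyGetD rl k 0]
        else d2 ++ [PySem.List.pyGetD rl k 0 - PySem.List.pyGetD rl (k - 1) 0]) [] = diffs 0 rl := by
  have hbody : (fun (d2 : List Int) (k : Int) =>
      if k == 0 then d2 ++ [PySem.List.pyGetD rl k 0]
      else d2 ++ [PySem.List.pyGetD rl k 0 - PySem.List.pyGetD rl (k - 1) 0]) =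
      (fun d2 k => d2 ++ [if k == 0 then PySem.List.pyGetD rl k 0
        else PySem.List.pyGetD rl k 0 - PySem.List.pyGetD rl (k - 1) 0]) := by
    funext d2 k; split <;> rfl
  rw [hbody, PySem.List.foldl_append_singleton_eq_map, List.nil_append, d2_map_eq_diffs]

theorem gfold (s : List Int) (acc : List Int) (p : Int) :
    s.foldl (fun (gp : List Int × Int) r => (gp.1 ++ [r - gp.2], r)) (acc, p)
      = (acc ++ diffs p s, s.getLastD p) := by
  induction s generalizing acc p with
  | nil => simp [diffs]
  | cons x xs ih =>
    rw [List.foldl_cons, List.getLastD_cons]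
    simpa [diffs] using ih (acc ++ [x - p]) x

theorem foldl_maxstep_some (t : List Int) (b : Int) :
    t.foldl (fun (o : Option Int) c => match o with
      | none => some c
      | some b => if b < c then some c else some b) (some b)
      = some (t.foldl max b) := by
  induction t generalizing b with
  | nil => rfl
  | cons c t ih =>
    rw [List.foldl_cons, List.foldl_cons]
    rcases lt_or_ge b c with h | h
    · simpa [h, max_eq_right h.le] using ih c
    · simpa [not_lt.mpr h, max_eq_left h] using ih b

theorem foldl_maxstep_none (L : List Int) :
    L.foldl (fun (o : Option Int) c => match o with
      | none => some c
      | some b => if b < c then some c else some b) none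
      = PySem.List.max? L (fun y => y) := by
  cases L with
  | nil => rfl
  | cons x t => rw [List.foldl_cons, foldl_maxstep_some, PySem.List.max?_id_cons]

theorem nested_maxfold (outer : List Int) (g : Int → List Int) (f : Int → Int → Int) :
    outer.foldl (fun b i => (g i).foldl (fun (b : Option Int) j => match b with
      | none => some (f i j)
      | some x => if x < f i j then some (f i j) else some x) b) none
      = PySem.List.max? (outer.flatMap (fun i => (g i).map (f i))) (fun y => y) := by
  rw [← foldl_maxstep_none, List.foldl_flatMap]
  congr 1
  funext b i
  rw [List.foldl_map]

theorem slice_merge_eq_mergeAt (l : List Int) (k : Int) (hk : 0 ≤ k) :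
    PySem.List.slice l none (some k) ++ [PySem.List.pyGetD l k 0 + PySem.List.pyGetD l (k + 1) 0]
      ++ PySem.List.slice l (some (k + 2)) none = mergeAt k.toNat l := by
  obtain ⟨kN, rfl⟩ : ∃ m : Nat, k = (m : Int) := ⟨k.toNat, (Int.toNat_of_nonneg hk).symm⟩
  have h1 : (kN : Int) + 1 = ((kN + 1 : Nat) : Int) := by push_cast; ring
  have h2 : (kN : Int) + 2 = ((kN + 2 : Nat) : Int) := by push_cast; ring
  rw [h1, h2, PySem.List.slice_to_natCast, PySem.List.slice_from_natCast,
    PySem.List.pyGetD_natCast, PySem.List.pyGetD_natCast]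
  simp [mergeAt]

theorem A_eq (distance : Int) (rocks : List Int) (n : Int) :
    solution distance rocks n
      = (PySem.List.max? (allPairs distance (PySem.List.sorted rocks (fun x => x))) (fun x => x)).getD 0 := by
  unfold solution
  simp only [PySem.List.foldl_append_singleton_eq_map, PySem.List.foldl_append_eq_flatMap,
    List.nil_append]
  refine congrArg (fun L => (PySem.List.max? L (fun x => x)).getD 0) ?_
  unfold allPairs
  apply List.flatMap_congr
  intro i hi
  apply List.map_congr_left
  intro j hj
  rcases PySem.List.mem_pyRange_one.mp hi with ⟨hi0, hi1⟩
  rcases PySem.List.mem_pyRange_one.mp hj with ⟨hj0, hj1⟩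
  have hs : (PySem.List.sorted rocks (fun x => x)).Pairwise (· ≤ ·) :=
    PySem.List.sorted_pairwise rocks (fun x => x)
  obtain ⟨iN, rfl⟩ : ∃ m : Nat, i = (m : Int) := ⟨i.toNat, (Int.toNat_of_nonneg hi0).symm⟩
  obtain ⟨jN, rfl⟩ : ∃ m : Nat, j = (m : Int) := ⟨j.toNat, (Int.toNat_of_nonneg (by omega)).symm⟩
  set s := PySem.List.sorted rocks (fun x => x) with hsdef
  have hjlt : jN < s.length := by exact_mod_cast hj1
  have hij : iN < jN := by exact_mod_cast (by omega : (iN : Int) < (jN : Int))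
  have hilt : iN < (s.eraseIdx jN).length := by
    rw [List.length_eraseIdx_of_lt hjlt]; omega
  have hs' : (s.eraseIdx jN).Pairwise (· ≤ ·) :=
    List.Pairwise.sublist (List.eraseIdx_sublist s jN) hs
  simp only [List.map_id', PySem.List.pyGetD_natCast]
  rw [remove_getD_sorted s jN hs hjlt, Option.getD_some,
    remove_getD_sorted (s.eraseIdx jN) iN hs' hilt, Option.getD_some,
    d2_foldl_eq_diffs, diffs_eraseIdx _ iN 0 distance hilt,
    diffs_eraseIdx s jN 0 distance hjlt]
  simp only [pairVal, Int.toNat_natCast]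

theorem B_eq (distance : Int) (rocks : List Int) (n : Int) :
    solution_alt distance rocks n
      = (PySem.List.max? (allPairs distance (PySem.List.sorted rocks (fun x => x))) (fun x => x)).getD 0 := by
  unfold solution_alt
  simp only [gfold, List.nil_append]
  rw [← diffs_append_singleton]
  rw [nested_maxfold]
  have hpairs : ((PySem.List.pyRange 0 ((((PySem.List.sorted rocks (fun x => x)).length : Int)) - 1) 1).flatMap
      (fun i => (PySem.List.pyRange (i + 1) (((PySem.List.sorted rocks (fun x => x)).length : Int)) 1).map
        (fun j =>
          (PySem.List.min?
            (PySem.List.slice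
                (PySem.List.slice (diffs 0 (PySem.List.sorted rocks (fun x => x) ++ [distance])) none (some j) ++
                  [PySem.List.pyGetD (diffs 0 (PySem.List.sorted rocks (fun x => x) ++ [distance])) j 0 +
                    PySem.List.pyGetD (diffs 0 (PySem.List.sorted rocks (fun x => x) ++ [distance])) (j + 1) 0] ++
                  PySem.List.slice (diffs 0 (PySem.List.sorted rocks (fun x => x) ++ [distance])) (some (j + 2)) none)
                none (some i) ++
              [PySem.List.pyGetD
                  (PySem.List.slice (diffs 0 (PySem.List.sorted rocks (fun x => x) ++ [distance])) none (some j) ++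
                    [PySem.List.pyGetD (diffs 0 (PySem.List.sorted rocks (fun x => x) ++ [distance])) j 0 +
                      PySem.List.pyGetD (diffs 0 (PySem.List.sorted rocks (fun x => x) ++ [distance])) (j + 1) 0] ++
                    PySem.List.slice (diffs 0 (PySem.List.sorted rocks (fun x => x) ++ [distance])) (some (j + 2)) none)
                  i 0 +
                PySem.List.pyGetD
                  (PySem.List.slice (diffs 0 (PySem.List.sorted rocks (fun x => x) ++ [distance])) none (some j) ++
                    [PySem.List.pyGetD (diffs 0 (PySem.List.sorted rocks (fun x => x) ++ [distance])) j 0 +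
                      PySem.List.pyGetD (diffs 0 (PySem.List.sorted rocks (fun x => x) ++ [distance])) (j + 1) 0] ++
                    PySem.List.slice (diffs 0 (PySem.List.sorted rocks (fun x => x) ++ [distance])) (some (j + 2)) none)
                  (i + 1) 0] ++
              PySem.List.slice
                (PySem.List.slice (diffs 0 (PySem.List.sorted rocks (fun x => x) ++ [distance])) none (some j) ++
                  [PySem.List.pyGetD (diffs 0 (PySem.List.sorted rocks (fun x => x) ++ [distance])) j 0 +
                    PySem.List.pyGetD (diffs 0 (PySem.List.sorted rocks (fun x => x) ++ [distance])) (j + 1) 0] ++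
                  PySem.List.slice (diffs 0 (PySem.List.sorted rocks (fun x => x) ++ [distance])) (some (j + 2)) none)
                (some (i + 2)) none)
            (fun x => x)).getD 0)))
      = allPairs distance (PySem.List.sorted rocks (fun x => x)) := by
    unfold allPairs
    apply List.flatMap_congr
    intro i hi
    apply List.map_congr_left
    intro j hj
    rcases PySem.List.mem_pyRange_one.mp hi with ⟨hi0, hi1⟩
    rcases PySem.List.mem_pyRange_one.mp hj with ⟨hj0, hj1⟩
    rw [slice_merge_eq_mergeAt _ j (by omega), slice_merge_eq_mergeAt _ i (by omega)]
    rfl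
  rw [hpairs]
  cases PySem.List.max? (allPairs distance (PySem.List.sorted rocks (fun x => x))) (fun x => x) <;> rfl

-- ===== VERDICT (by name: the statement is the Claim_ definition above) =====
theorem solution_spec : Claim_equal_solution := by
  intro distance rocks n _ _
  show solution distance rocks n = solution_alt distance rocks n
  rw [A_eq distance rocks n, B_eq distance rocks n]
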